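-- pv_equiv track=rewrite | github.com/prateekgupta25apr/Python | FormattedNumber.py | FormattedNumber
-- ===== SOURCE A (Python) =====
-- def FormattedNumber(strArr):
--     # Splitting string by commas
--     l = strArr[0].split(",")
--
--     # Traversing through list l
--     for i in range(len(l)):
--
--         # Checking for 2 adjacent commas and more than 3 numbers between 2 commas
--         if len(l[i]) == 0:
--             return "false"
--
--         # Splitting element by decimal
--         f = l[i].split(".")
--
--         # Making sure decimal is not placed at the start or end of the element
--         if len(f[0]) == 0 or len(f[-1]) == 0:
--             return "false"
--
--         # Checking first element
--         if i == 0: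
--
--             # Making sure not more than 1 decimal is placed
--             if len(f) > 2:
--                 return "false"
--
--             # Making sure there are only 3 digits before decimal
--             if len(f[0]) > 3:
--                 return "false"
--
--         # Checking for last element
--         elif i == (len(l) - 1) and len(l) > 1:
--
--             # Making sure not more than 1 decimal is placed
--             if len(f) > 2:
--                 return "false"
--
--             # Making sure decimal is placed after 3 digits
--             if len(f[0]) != 3:
--                 return "false"
--
--         # Checking middle elements
--         else:
--
--             # Making sure no decimal is placed
--             if len(f) > 1:
--                 return "false"
--
--             # Making sure element length is 3 only
--             if len(l[i]) != 3:
--                 return "false"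
--
--     # Returning "true" if all the commas and decimals are placed correctly
--     return "true"
-- ===== SOURCE B (Python) =====
-- def FormattedNumber(strArr):
--     s = strArr[0]
--     # single pass over the characters: a small state machine instead of split+per-token loop
--     seen_comma = False
--     head = 0        # chars before the dot in the current token
--     frac = None     # None = no dot yet in current token, else chars after the dot
--     for c in s:
--         if c == ',':
--             if seen_comma:
--                 if head != 3 or frac is not None:
--                     return "false"
--             else:
--                 if not (1 <= head <= 3) or frac == 0:
--                     return "false"
--             seen_comma = True
--             head, frac = 0, None
--         elif c == '.':
--             if frac is not None or head == 0:
--                 return "false"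
--             frac = 0
--         else:
--             if frac is None:
--                 head += 1
--             else:
--                 frac += 1
--     if seen_comma:
--         return "true" if head == 3 and (frac is None or frac > 0) else "false"
--     return "true" if 1 <= head <= 3 and (frac is None or frac > 0) else "false"
-- ===== Notes on version B (the rewrite author's own statement) =====
-- stated objective: alternative
-- what changed: Replaces split-by-comma plus a per-token loop that re-splits each token by '.' with a single left-to-right character scan driving a small state machine (seen_comma flag, pre-dot and post-dot counters).
import Mathlib
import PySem

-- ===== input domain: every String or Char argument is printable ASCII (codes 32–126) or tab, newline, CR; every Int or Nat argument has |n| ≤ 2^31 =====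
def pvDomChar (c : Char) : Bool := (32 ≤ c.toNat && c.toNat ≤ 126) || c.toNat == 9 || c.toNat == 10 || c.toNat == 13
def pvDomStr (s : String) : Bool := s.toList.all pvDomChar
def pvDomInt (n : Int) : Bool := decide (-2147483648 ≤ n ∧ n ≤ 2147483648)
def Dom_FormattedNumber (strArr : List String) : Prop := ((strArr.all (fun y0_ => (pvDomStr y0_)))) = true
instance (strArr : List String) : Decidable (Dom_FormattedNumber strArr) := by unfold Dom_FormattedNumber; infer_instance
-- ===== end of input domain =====

-- B replaces split-by-comma plus a per-token loop (re-splitting each token by '.') with a single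
-- character scan driving a small state machine; same return value, no speed claim.

-- ===== PORT A =====
-- the 'for i in range(len(l))' loop: recursion over the index list, l fixed
def pvLoopA (l : List (List Char)) : List Int → String
  | [] => "true"
  | i :: is =>
    let t := PySem.List.pyGetD l i []
    if t.length = 0 then "false"
    else
      let f := PySem.Chars.splitOn t ['.']
      if (PySem.List.pyGetD f 0 []).length = 0 ∨ (PySem.List.pyGetD f (-1) []).length = 0 then "false"
      else if i = 0 then
        if f.length > 2 then "false"
        else if (PySem.List.pyGetD f 0 []).length > 3 then "false"
        else pvLoopA l is
      else if i = (l.length : Int) - 1 ∧ (l.length : Int) > 1 then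
        if f.length > 2 then "false"
        else if ¬ (PySem.List.pyGetD f 0 []).length = 3 then "false"
        else pvLoopA l is
      else
        if f.length > 1 then "false"
        else if ¬ t.length = 3 then "false"
        else pvLoopA l is

def FormattedNumber (strArr : List String) : String :=
  match PySem.List.pyGet? strArr 0 with
  | none => ""   -- strArr[0] raises IndexError: excluded by Pre_
  | some s =>
    let l := PySem.Chars.splitOn s.toList [',']
    pvLoopA l (PySem.List.pyRange 0 (l.length : Int) 1)

-- ===== PORT B =====
-- the 'for c in s' state machine: seen-comma flag, pre-dot counter, optional post-dot counter
def pvLoopB : List Char → Bool → Nat → Option Nat → String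
  | [], sc, head, frac =>
    if sc then
      if head = 3 ∧ (frac = none ∨ ∃ k, frac = some k ∧ 0 < k) then "true" else "false"
    else
      if (1 ≤ head ∧ head ≤ 3) ∧ (frac = none ∨ ∃ k, frac = some k ∧ 0 < k) then "true" else "false"
  | c :: rest, sc, head, frac =>
    if c = ',' then
      if sc then
        if ¬ head = 3 ∨ ¬ frac = none then "false" else pvLoopB rest true 0 none
      else
        if ¬ (1 ≤ head ∧ head ≤ 3) ∨ frac = some 0 then "false" else pvLoopB rest true 0 none
    else if c = '.' then
      if ¬ frac = none ∨ head = 0 then "false" else pvLoopB rest sc head (some 0)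
    else
      match frac with
      | none => pvLoopB rest sc (head + 1) none
      | some k => pvLoopB rest sc head (some (k + 1))

def FormattedNumber_alt (strArr : List String) : String :=
  match PySem.List.pyGet? strArr 0 with
  | none => ""   -- strArr[0] raises IndexError: excluded by Pre_
  | some s => pvLoopB s.toList false 0 none

-- ===== PRECONDITION & SPEC =====
-- A evaluates strArr[0]; on the empty list it raises IndexError, so Pre_ requires a nonempty list.
def Pre_FormattedNumber (strArr : List String) : Prop := strArr ≠ []
instance (strArr : List String) : Decidable (Pre_FormattedNumber strArr) := by
  unfold Pre_FormattedNumber; infer_instance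

def pvWitness_FormattedNumber : List String := ["1,234.56"]

def Spec_FormattedNumber (strArr : List String) (out : String) : Prop := out = FormattedNumber_alt strArr
instance (strArr : List String) (out : String) : Decidable (Spec_FormattedNumber strArr out) := by
  unfold Spec_FormattedNumber; infer_instance

-- ===== CLAIM (what is proved, stated in full; the proofs are below) =====
def Claim_equal_FormattedNumber : Prop := ∀ (strArr : List String), Dom_FormattedNumber strArr → Pre_FormattedNumber strArr → Spec_FormattedNumber strArr (FormattedNumber strArr)

-- ===== LEMMAS AND PROOFS =====

-- first piece / remaining pieces of splitting at a single separator character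
def pvSpl (c : Char) : List Char → (List Char × List (List Char))
  | [] => ([], [])
  | a :: s =>
    if a = c then ([], (pvSpl c s).1 :: (pvSpl c s).2)
    else (a :: (pvSpl c s).1, (pvSpl c s).2)

lemma pvSplitOn_go_eq (c : Char) :
    ∀ (fuel : Nat) (l cur acc : List _), l.length < fuel →
      PySem.Chars.splitOn.go [c] fuel l cur acc =
        acc.reverse ++ ((cur.reverse ++ (pvSpl c l).1) :: (pvSpl c l).2) := by
  intro fuel
  induction fuel with
  | zero => intro l cur acc h; omega
  | succ n ih =>
    intro l cur acc h
    cases l with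
    | nil => simp [PySem.Chars.splitOn.go, pvSpl]
    | cons a s =>
      rw [PySem.Chars.splitOn.go]
      by_cases hac : c = a
      · subst hac
        simp only [List.isPrefixOf, beq_self_eq_true, Bool.true_and, List.isPrefixOf_nil_left,
          if_true, List.length_singleton, List.drop_succ_cons, List.drop_zero]
        rw [ih s [] ((cur.reverse) :: acc) (by simpa using Nat.lt_of_succ_lt_succ h)]
        simp [pvSpl]
      · have hpre : ([c].isPrefixOf (a :: s)) = false := by
          simp [List.isPrefixOf]
          exact fun hh => (hac hh).elim
        rw [hpre]
        simp only [Bool.false_eq_true, if_false]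
        rw [ih s (a :: cur) acc (by simpa using Nat.lt_of_succ_lt_succ h)]
        have hne : ¬ a = c := fun hh => hac hh.symm
        simp [pvSpl, hne]

lemma pvSplitOn_eq (c : Char) (s : List Char) :
    PySem.Chars.splitOn s [c] = (pvSpl c s).1 :: (pvSpl c s).2 := by
  rw [PySem.Chars.splitOn, pvSplitOn_go_eq c _ _ _ _ (by omega)]
  simp

lemma pvSpl_no_sep {c : Char} {a : List Char} (h : c ∉ a) : pvSpl c a = (a, []) := by
  induction a with
  | nil => rfl
  | cons x xs ih =>
    have hx : ¬ x = c := fun hh => h (by simp [hh])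
    have := ih (fun hm => h (List.mem_cons_of_mem _ hm))
    simp [pvSpl, hx, this]

lemma pvSpl_append_sep {c : Char} {a : List Char} (h : c ∉ a) (q : List Char) :
    pvSpl c (a ++ c :: q) = (a, (pvSpl c q).1 :: (pvSpl c q).2) := by
  induction a with
  | nil => simp [pvSpl]
  | cons x xs ih =>
    have hx : ¬ x = c := fun hh => h (by simp [hh])
    have := ih (fun hm => h (List.mem_cons_of_mem _ hm))
    simp [pvSpl, hx, this]

lemma pvSplitOn_no_sep {c : Char} {a : List Char} (h : c ∉ a) :
    PySem.Chars.splitOn a [c] = [a] := by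
  rw [pvSplitOn_eq, pvSpl_no_sep h]

lemma pvSplitOn_append_sep {c : Char} {a : List Char} (h : c ∉ a) (q : List Char) :
    PySem.Chars.splitOn (a ++ c :: q) [c] = a :: PySem.Chars.splitOn q [c] := by
  rw [pvSplitOn_eq, pvSpl_append_sep h, pvSplitOn_eq]

-- A's per-token tests, extracted from the three branches of pvLoopA
def pvCheckFirst (t : List Char) : Bool :=
  if t.length = 0 then false
  else
    let f := PySem.Chars.splitOn t ['.']
    if (PySem.List.pyGetD f 0 []).length = 0 ∨ (PySem.List.pyGetD f (-1) []).length = 0 then false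
    else if f.length > 2 then false
    else if (PySem.List.pyGetD f 0 []).length > 3 then false
    else true

def pvCheckLast (t : List Char) : Bool :=
  if t.length = 0 then false
  else
    let f := PySem.Chars.splitOn t ['.']
    if (PySem.List.pyGetD f 0 []).length = 0 ∨ (PySem.List.pyGetD f (-1) []).length = 0 then false
    else if f.length > 2 then false
    else if ¬ (PySem.List.pyGetD f 0 []).length = 3 then false
    else true

def pvCheckMid (t : List Char) : Bool :=
  if t.length = 0 then false
  else
    let f := PySem.Chars.splitOn t ['.']
    if (PySem.List.pyGetD f 0 []).length = 0 ∨ (PySem.List.pyGetD f (-1) []).length = 0 then false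
    else if f.length > 1 then false
    else if ¬ t.length = 3 then false
    else true

-- common verdict function both loops are reduced to
def pvChkFrom : Bool → List (List Char) → String
  | _, [] => "true"
  | sc, [t] => if (if sc then pvCheckLast t else pvCheckFirst t) then "true" else "false"
  | sc, t :: u :: v =>
    if (if sc then pvCheckMid t else pvCheckFirst t) then pvChkFrom true (u :: v) else "false"

-- the branch of pvLoopA taken at index 0 is exactly pvCheckFirst
lemma pvLoopA_first (l : List (List Char)) (is : List Int) :
    pvLoopA l (0 :: is) =
      if pvCheckFirst (PySem.List.pyGetD l 0 []) then pvLoopA l is else "false" := by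
  simp only [pvLoopA, pvCheckFirst]
  split_ifs <;> simp_all

lemma pvLoopA_last (l : List (List Char)) (is : List Int) (i : Int)
    (h0 : ¬ i = 0) (hL : i = (l.length : Int) - 1 ∧ (l.length : Int) > 1) :
    pvLoopA l (i :: is) =
      if pvCheckLast (PySem.List.pyGetD l i []) then pvLoopA l is else "false" := by
  simp only [pvLoopA, pvCheckLast]
  split_ifs <;> simp_all

lemma pvLoopA_mid (l : List (List Char)) (is : List Int) (i : Int)
    (h0 : ¬ i = 0) (hL : ¬ (i = (l.length : Int) - 1 ∧ (l.length : Int) > 1)) :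
    pvLoopA l (i :: is) =
      if pvCheckMid (PySem.List.pyGetD l i []) then pvLoopA l is else "false" := by
  simp only [pvLoopA, pvCheckMid]
  split_ifs <;> simp_all

-- A's loop from index i ≥ 1 onwards computes pvChkFrom true on the remaining tokens
lemma pvLoopA_from (l : List (List Char)) :
    ∀ (d i : Nat), l.length - i = d → 1 ≤ i →
      pvLoopA l (PySem.List.pyRange (i : Int) (l.length : Int) 1) = pvChkFrom true (l.drop i) := by
  intro d
  induction d with
  | zero =>
    intro i hd hi
    have hle : l.length ≤ i := by omega
    rw [PySem.List.pyRange_one_eq_nil (by exact_mod_cast hle)]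
    rw [List.drop_eq_nil_of_le hle]
    rfl
  | succ n ih =>
    intro i hd hi
    have hlt : i < l.length := by omega
    rw [PySem.List.pyRange_one_cons (by exact_mod_cast hlt)]
    have hget : PySem.List.pyGetD l (i : Int) [] = l[i] := by
      rw [PySem.List.pyGetD_natCast, List.getD_eq_getElem _ _ hlt]
    have hdrop : l.drop i = l[i] :: l.drop (i + 1) := by
      rw [List.drop_eq_getElem_cons hlt]
    by_cases hlast : i = l.length - 1
    · have hL : (i : Int) = (l.length : Int) - 1 ∧ (l.length : Int) > 1 := by
        constructor <;> [omega; omega]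
      rw [pvLoopA_last l _ _ (by omega) hL, hget]
      have hd1 : l.drop (i + 1) = [] := List.drop_eq_nil_of_le (by omega)
      have hr1 : PySem.List.pyRange ((i : Int) + 1) (l.length : Int) 1 = [] :=
        PySem.List.pyRange_one_eq_nil (by omega)
      rw [hr1, hdrop, hd1]
      cases hc : pvCheckLast l[i] <;> simp [pvChkFrom, hc, pvLoopA]
    · have hL : ¬ ((i : Int) = (l.length : Int) - 1 ∧ (l.length : Int) > 1) := by
        intro hh
        omega
      rw [pvLoopA_mid l _ _ (by omega) hL, hget]
      have hne : l.drop (i + 1) ≠ [] := by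
        intro hh
        have := List.drop_eq_nil_iff.mp hh
        omega
      obtain ⟨u, v, huv⟩ := List.exists_cons_of_ne_nil hne
      have hstep : ((i : Int) + 1) = ((i + 1 : Nat) : Int) := by push_cast; ring
      rw [hstep, ih (i + 1) (by omega) (by omega)]
      rw [hdrop, huv]
      cases hc : pvCheckMid l[i] <;> simp [pvChkFrom, hc]

-- A's whole loop computes pvChkFrom false on the token list
lemma pvLoopA_top (l : List (List Char)) (t : List Char) (ts : List (List Char)) (hl : l = t :: ts) :
    pvLoopA l (PySem.List.pyRange 0 (l.length : Int) 1) = pvChkFrom false l := by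
  have hlen : 1 ≤ l.length := by rw [hl]; simp
  have h0 : (0 : Int) < (l.length : Int) := by exact_mod_cast hlen
  rw [PySem.List.pyRange_one_cons h0, pvLoopA_first]
  have hget : PySem.List.pyGetD l 0 [] = t := by rw [hl]; simp [PySem.List.pyGetD_natCast]
  rw [hget]
  cases ts with
  | nil =>
    have hr : PySem.List.pyRange (0 + 1) (l.length : Int) 1 = [] := by
      apply PySem.List.pyRange_one_eq_nil
      rw [hl]
      simp
    rw [hr, hl]
    cases hc : pvCheckFirst t <;> simp [pvChkFrom, hc, pvLoopA]
  | cons u v =>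
    have h1 : ((0 : Int) + 1) = ((1 : Nat) : Int) := by norm_num
    rw [h1, pvLoopA_from l (l.length - 1) 1 rfl le_rfl]
    have hd : l.drop 1 = u :: v := by rw [hl]; rfl
    rw [hd, hl]
    cases hc : pvCheckFirst t <;> simp [pvChkFrom, hc]

-- the token B's current state stands for
def pvTok (a : List Char) (b : Option (List Char)) : List Char :=
  a ++ (match b with | none => [] | some bb => '.' :: bb)

-- index helpers for two-element token splits
lemma pvGetD_zero {α : Type} (x : α) (r : List α) (d : α) : PySem.List.pyGetD (x :: r) 0 d = x := by
  simp [pysem]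

lemma pvGetD_neg1_one {α : Type} (x : α) (d : α) : PySem.List.pyGetD [x] (-1) d = x := by
  simp [PySem.List.pyGetD, PySem.List.pyGet?, PySem.List.pyIdx?]

lemma pvGetD_neg1_two {α : Type} (x y : α) (d : α) : PySem.List.pyGetD [x, y] (-1) d = y := by
  simp [PySem.List.pyGetD, PySem.List.pyGet?, PySem.List.pyIdx?]

lemma pvCheckFirst_none {a : List Char} (hA : '.' ∉ a) :
    pvCheckFirst a = decide (1 ≤ a.length ∧ a.length ≤ 3) := by
  unfold pvCheckFirst
  rw [pvSplitOn_no_sep hA]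
  simp only [pvGetD_zero, pvGetD_neg1_one]
  by_cases h1 : a.length = 0 <;> by_cases h2 : a.length > 3 <;>
    simp_all [List.length_eq_zero_iff] <;>
    (have h3 : 1 ≤ a.length := List.length_pos_of_ne_nil h1; simp [h3]; omega)

lemma pvCheckLast_none {a : List Char} (hA : '.' ∉ a) :
    pvCheckLast a = decide (a.length = 3) := by
  unfold pvCheckLast
  rw [pvSplitOn_no_sep hA]
  simp only [pvGetD_zero, pvGetD_neg1_one]
  by_cases h1 : a.length = 0 <;> by_cases h2 : a.length = 3 <;>
    simp_all [List.length_eq_zero_iff]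

lemma pvCheckMid_none {a : List Char} (hA : '.' ∉ a) :
    pvCheckMid a = decide (a.length = 3) := by
  unfold pvCheckMid
  rw [pvSplitOn_no_sep hA]
  simp only [pvGetD_zero, pvGetD_neg1_one]
  by_cases h1 : a.length = 0 <;> by_cases h2 : a.length = 3 <;>
    simp_all [List.length_eq_zero_iff]

lemma pvCheckFirst_some {a bb : List Char} (hA : '.' ∉ a) (hB : '.' ∉ bb) (ha : a ≠ []) :
    pvCheckFirst (a ++ '.' :: bb) = decide (a.length ≤ 3 ∧ bb ≠ []) := by
  unfold pvCheckFirst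
  rw [pvSplitOn_append_sep hA, pvSplitOn_no_sep hB]
  simp only [pvGetD_zero, pvGetD_neg1_two]
  by_cases h1 : bb = [] <;> by_cases h2 : a.length > 3 <;>
    simp_all [ha]

lemma pvCheckLast_some {a bb : List Char} (hA : '.' ∉ a) (hB : '.' ∉ bb) (ha : a ≠ []) :
    pvCheckLast (a ++ '.' :: bb) = decide (a.length = 3 ∧ bb ≠ []) := by
  unfold pvCheckLast
  rw [pvSplitOn_append_sep hA, pvSplitOn_no_sep hB]
  simp only [pvGetD_zero, pvGetD_neg1_two]
  by_cases h1 : bb = [] <;> by_cases h2 : a.length = 3 <;>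
    simp_all [ha]

lemma pvCheckMid_some {a bb : List Char} (hA : '.' ∉ a) :
    pvCheckMid (a ++ '.' :: bb) = false := by
  unfold pvCheckMid
  rw [pvSplitOn_append_sep hA, pvSplitOn_eq]
  by_cases h2 : (PySem.List.pyGetD (a :: (pvSpl '.' bb).1 :: (pvSpl '.' bb).2) 0 [] = []
      ∨ PySem.List.pyGetD (a :: (pvSpl '.' bb).1 :: (pvSpl '.' bb).2) (-1) [] = [])
  · simp [h2]
  · have hlen : (a :: (pvSpl '.' bb).1 :: (pvSpl '.' bb).2).length > 1 := by simp
    simp [h2, hlen]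

-- a token that fails all three checks sinks pvChkFrom to "false"
lemma pvChkFrom_false {sc : Bool} {t : List Char} {rest : List (List Char)}
    (h1 : pvCheckFirst t = false) (h2 : pvCheckMid t = false) (h3 : pvCheckLast t = false) :
    pvChkFrom sc (t :: rest) = "false" := by
  cases rest <;> cases sc <;> simp [pvChkFrom, h1, h2, h3]

-- a token beginning with '.' fails every check
lemma pvCheck_dot_start (q : List Char) :
    pvCheckFirst ('.' :: q) = false ∧ pvCheckMid ('.' :: q) = false ∧
      pvCheckLast ('.' :: q) = false := by
  have hs : PySem.Chars.splitOn ('.' :: q) ['.'] = [] :: PySem.Chars.splitOn q ['.'] := by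
    have := pvSplitOn_append_sep (c := '.') (a := []) (by simp) q
    simpa using this
  refine ⟨?_, ?_, ?_⟩
  · unfold pvCheckFirst
    rw [hs]
    simp only [pvGetD_zero]
    simp
  · unfold pvCheckMid
    rw [hs]
    simp only [pvGetD_zero]
    simp
  · unfold pvCheckLast
    rw [hs]
    simp only [pvGetD_zero]
    simp

-- a token with two dots fails every check
lemma pvCheck_two_dots {a bb : List Char} (hA : '.' ∉ a) (hB : '.' ∉ bb) (q : List Char) :
    pvCheckFirst (a ++ '.' :: (bb ++ '.' :: q)) = false ∧
      pvCheckMid (a ++ '.' :: (bb ++ '.' :: q)) = false ∧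
      pvCheckLast (a ++ '.' :: (bb ++ '.' :: q)) = false := by
  have hs : PySem.Chars.splitOn (a ++ '.' :: (bb ++ '.' :: q)) ['.'] =
      a :: bb :: ((pvSpl '.' q).1 :: (pvSpl '.' q).2) := by
    rw [pvSplitOn_append_sep hA, pvSplitOn_append_sep hB, pvSplitOn_eq]
  refine ⟨?_, ?_, ?_⟩
  · unfold pvCheckFirst
    rw [hs]
    simp only [pvGetD_zero]
    by_cases hE : PySem.List.pyGetD (a :: bb :: ((pvSpl '.' q).1 :: (pvSpl '.' q).2)) (-1)
        ([] : List Char) = [] <;> by_cases hA0 : a = ([] : List Char) <;> simp [hE, hA0]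
  · unfold pvCheckMid
    rw [hs]
    simp only [pvGetD_zero]
    by_cases hE : PySem.List.pyGetD (a :: bb :: ((pvSpl '.' q).1 :: (pvSpl '.' q).2)) (-1)
        ([] : List Char) = [] <;> by_cases hA0 : a = ([] : List Char) <;> simp [hE, hA0]
  · unfold pvCheckLast
    rw [hs]
    simp only [pvGetD_zero]
    by_cases hE : PySem.List.pyGetD (a :: bb :: ((pvSpl '.' q).1 :: (pvSpl '.' q).2)) (-1)
        ([] : List Char) = [] <;> by_cases hA0 : a = ([] : List Char) <;> simp [hE, hA0]


-- step equations for pvLoopB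
lemma pvLoopB_nil_true (h : Nat) (f : Option Nat) :
    pvLoopB [] true h f =
      if h = 3 ∧ (f = none ∨ ∃ k, f = some k ∧ 0 < k) then "true" else "false" := rfl

lemma pvLoopB_nil_false (h : Nat) (f : Option Nat) :
    pvLoopB [] false h f =
      if (1 ≤ h ∧ h ≤ 3) ∧ (f = none ∨ ∃ k, f = some k ∧ 0 < k) then "true" else "false" := rfl

lemma pvLoopB_comma_true (s : List Char) (h : Nat) (f : Option Nat) :
    pvLoopB (',' :: s) true h f =
      if ¬ h = 3 ∨ ¬ f = none then "false" else pvLoopB s true 0 none := by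
  rw [pvLoopB.eq_def]; rfl

lemma pvLoopB_comma_false (s : List Char) (h : Nat) (f : Option Nat) :
    pvLoopB (',' :: s) false h f =
      if ¬ (1 ≤ h ∧ h ≤ 3) ∨ f = some 0 then "false" else pvLoopB s true 0 none := by
  rw [pvLoopB.eq_def]; rfl

lemma pvLoopB_dot (s : List Char) (sc : Bool) (h : Nat) (f : Option Nat) :
    pvLoopB ('.' :: s) sc h f =
      if ¬ f = none ∨ h = 0 then "false" else pvLoopB s sc h (some 0) := by
  rw [pvLoopB.eq_def]; rfl

lemma pvLoopB_char_none {c : Char} (hc : ¬ c = ',') (hd : ¬ c = '.')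
    (s : List Char) (sc : Bool) (h : Nat) :
    pvLoopB (c :: s) sc h none = pvLoopB s sc (h + 1) none := by
  rw [pvLoopB.eq_def]; simp [hc, hd]

lemma pvLoopB_char_some {c : Char} (hc : ¬ c = ',') (hd : ¬ c = '.')
    (s : List Char) (sc : Bool) (h k : Nat) :
    pvLoopB (c :: s) sc h (some k) = pvLoopB s sc h (some (k + 1)) := by
  rw [pvLoopB.eq_def]; simp [hc, hd]

-- the main invariant: B's scan continued from a mid-token state equals the token-list verdict
lemma pvLoopB_main :
    ∀ (s : List Char) (sc : Bool) (a : List Char) (b : Option (List Char)),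
      '.' ∉ a → (∀ bb, b = some bb → '.' ∉ bb ∧ a ≠ []) →
      pvLoopB s sc a.length (b.map List.length) =
        pvChkFrom sc ((pvTok a b ++ (pvSpl ',' s).1) :: (pvSpl ',' s).2) := by
  intro s
  induction s with
  | nil =>
    intro sc a b hA hb
    show pvLoopB [] sc a.length (b.map List.length)
        = pvChkFrom sc ((pvTok a b ++ (pvSpl ',' []).1) :: (pvSpl ',' []).2)
    rw [show pvSpl ',' ([] : List Char) = ([], []) from rfl]
    cases b with
    | none =>
      cases sc
      · rw [show Option.map List.length none = (none : Option Nat) from rfl, pvLoopB_nil_false]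
        by_cases hcond : 1 ≤ a.length ∧ a.length ≤ 3 <;>
          simp [pvChkFrom, pvTok, hcond, pvCheckFirst_none hA]
      · rw [show Option.map List.length none = (none : Option Nat) from rfl, pvLoopB_nil_true]
        by_cases hcond : a.length = 3 <;>
          simp [pvChkFrom, pvTok, hcond, pvCheckLast_none hA]
    | some bb =>
      obtain ⟨hB, ha⟩ := hb bb rfl
      have hcf := pvCheckFirst_some hA hB ha
      have hcl := pvCheckLast_some hA hB ha
      have hlp : 1 ≤ a.length := List.length_pos_of_ne_nil ha
      cases sc
      · rw [show Option.map List.length (some bb) = some bb.length from rfl, pvLoopB_nil_false]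
        by_cases h2 : bb = []
        · subst h2
          rw [if_neg (by
            rintro ⟨-, hor⟩
            rcases hor with h | ⟨k, hk, hkp⟩
            · simp at h
            · simp at hk
              omega)]
          simp [pvChkFrom, pvTok, hcf]
        · have hbl : 0 < bb.length := List.length_pos_of_ne_nil h2
          by_cases h1 : a.length ≤ 3
          · rw [if_pos ⟨⟨hlp, h1⟩, Or.inr ⟨bb.length, rfl, hbl⟩⟩]
            simp [pvChkFrom, pvTok, hcf, h1, h2]
          · rw [if_neg (by intro hh; exact h1 hh.1.2)]
            simp [pvChkFrom, pvTok, hcf, h1]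
      · rw [show Option.map List.length (some bb) = some bb.length from rfl, pvLoopB_nil_true]
        by_cases h2 : bb = []
        · subst h2
          rw [if_neg (by
            rintro ⟨-, hor⟩
            rcases hor with h | ⟨k, hk, hkp⟩
            · simp at h
            · simp at hk
              omega)]
          simp [pvChkFrom, pvTok, hcl]
        · have hbl : 0 < bb.length := List.length_pos_of_ne_nil h2
          by_cases h1 : a.length = 3
          · rw [if_pos ⟨h1, Or.inr ⟨bb.length, rfl, hbl⟩⟩]
            simp [pvChkFrom, pvTok, hcl, h1, h2]
          · rw [if_neg (fun hh => h1 hh.1)]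
            simp [pvChkFrom, pvTok, hcl, h1]
  | cons c s ih =>
    intro sc a b hA hb
    by_cases hc : c = ','
    · subst hc
      show pvLoopB (',' :: s) sc a.length (b.map List.length)
          = pvChkFrom sc ((pvTok a b ++ (pvSpl ',' (',' :: s)).1) :: (pvSpl ',' (',' :: s)).2)
      rw [show pvSpl ',' (',' :: s) = ([], (pvSpl ',' s).1 :: (pvSpl ',' s).2) by simp [pvSpl]]
      have hrec := ih true [] none (by simp) (by simp)
      simp only [List.length_nil, Option.map_none, pvTok, List.append_nil, List.nil_append] at hrec
      cases sc
      · rw [pvLoopB_comma_false]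
        by_cases hcond : ¬ (1 ≤ a.length ∧ a.length ≤ 3) ∨ (b.map List.length) = some 0
        · have hF : pvCheckFirst (pvTok a b) = false := by
            cases b with
            | none =>
              rcases hcond with hcond | hcond
              · rw [pvTok, List.append_nil, pvCheckFirst_none hA]
                simpa using hcond
              · simp at hcond
            | some bb =>
              obtain ⟨hB, ha⟩ := hb bb rfl
              rw [pvTok, pvCheckFirst_some hA hB ha]
              rcases hcond with hcond | hcond
              · have h1 : 1 ≤ a.length := List.length_pos_of_ne_nil ha
                simp only [decide_eq_false_iff_not]
                intro hx
                exact hcond ⟨h1, hx.1⟩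
              · have hbb : bb = [] := by
                  simpa [List.length_eq_zero_iff] using hcond
                simp [hbb]
          rw [if_pos hcond]
          simp [pvChkFrom, List.append_nil, hF]
        · have hok : (1 ≤ a.length ∧ a.length ≤ 3) ∧ ¬ (b.map List.length) = some 0 := by
            push Not at hcond
            exact ⟨hcond.1, hcond.2⟩
          have hF : pvCheckFirst (pvTok a b) = true := by
            cases b with
            | none =>
              rw [pvTok, List.append_nil, pvCheckFirst_none hA]
              simpa using hok.1
            | some bb =>
              obtain ⟨hB, ha⟩ := hb bb rfl
              rw [pvTok, pvCheckFirst_some hA hB ha]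
              have hbb : bb ≠ [] := by
                intro hh
                exact hok.2 (by simp [hh])
              simp [hok.1.2, hbb]
          rw [if_neg hcond, hrec]
          simp [pvChkFrom, List.append_nil, hF]
      · rw [pvLoopB_comma_true]
        by_cases hcond : ¬ a.length = 3 ∨ ¬ (b.map List.length) = none
        · have hF : pvCheckMid (pvTok a b) = false := by
            cases b with
            | none =>
              rcases hcond with hcond | hcond
              · rw [pvTok, List.append_nil, pvCheckMid_none hA]
                simpa using hcond
              · simp at hcond
            | some bb =>
              have := pvCheckMid_some (bb := bb) hA
              rw [pvTok]
              exact this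
          rw [if_pos hcond]
          simp [pvChkFrom, List.append_nil, hF]
        · have hok : a.length = 3 ∧ b = none := by
            push Not at hcond
            refine ⟨hcond.1, ?_⟩
            cases b with
            | none => rfl
            | some bb => simp at hcond
          have hF : pvCheckMid (pvTok a b) = true := by
            rw [hok.2, pvTok, List.append_nil, pvCheckMid_none hA]
            simpa using hok.1
          rw [if_neg hcond, hrec]
          simp [pvChkFrom, List.append_nil, hF]
    · show pvLoopB (c :: s) sc a.length (b.map List.length)
          = pvChkFrom sc ((pvTok a b ++ (pvSpl ',' (c :: s)).1) :: (pvSpl ',' (c :: s)).2)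
      rw [show pvSpl ',' (c :: s) = (c :: (pvSpl ',' s).1, (pvSpl ',' s).2) by simp [pvSpl, hc]]
      by_cases hdot : c = '.'
      · subst hdot
        rw [pvLoopB_dot]
        by_cases hfail : ¬ (b.map List.length) = none ∨ a.length = 0
        · have hfalse : pvChkFrom sc ((pvTok a b ++ '.' :: (pvSpl ',' s).1) :: (pvSpl ',' s).2)
              = "false" := by
            cases b with
            | none =>
              have ha0 : a = [] := by
                rcases hfail with hfail | hfail
                · simp at hfail
                · exact List.eq_nil_of_length_eq_zero hfail
              subst ha0
              obtain ⟨g1, g2, g3⟩ := pvCheck_dot_start (pvSpl ',' s).1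
              simpa [pvTok] using pvChkFrom_false g1 g2 g3
            | some bb =>
              obtain ⟨hB, ha⟩ := hb bb rfl
              obtain ⟨g1, g2, g3⟩ := pvCheck_two_dots hA hB (pvSpl ',' s).1
              have htok : pvTok a (some bb) ++ '.' :: (pvSpl ',' s).1
                  = a ++ '.' :: (bb ++ '.' :: (pvSpl ',' s).1) := by
                simp [pvTok]
              rw [htok]
              exact pvChkFrom_false g1 g2 g3
          rw [if_pos hfail, hfalse]
        · push Not at hfail
          obtain ⟨hbn, han⟩ := hfail
          have hb0 : b = none := by
            cases b with
            | none => rfl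
            | some bb => simp at hbn
          subst hb0
          have hane : a ≠ [] := fun hh => han (by simp [hh])
          have hrec := ih sc a (some []) hA (fun bb hbb => by
            cases hbb
            exact ⟨by simp, hane⟩)
          simp only [Option.map_some, List.length_nil] at hrec
          rw [if_neg (by simp [han]), hrec]
          have htok : pvTok a (some []) ++ (pvSpl ',' s).1
              = pvTok a none ++ '.' :: (pvSpl ',' s).1 := by
            simp [pvTok]
          rw [htok]
      · cases b with
        | none =>
          rw [show Option.map List.length none = (none : Option Nat) from rfl,
            pvLoopB_char_none hc hdot]
          have hrec := ih sc (a ++ [c]) none (by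
            intro hm
            rcases List.mem_append.mp hm with hm | hm
            · exact hA hm
            · simp at hm
              exact hdot hm.symm) (by simp)
          simp only [Option.map_none, List.length_append, List.length_cons,
            List.length_nil] at hrec
          rw [hrec]
          have htok : pvTok (a ++ [c]) none ++ (pvSpl ',' s).1
              = pvTok a none ++ c :: (pvSpl ',' s).1 := by
            simp [pvTok]
          rw [htok]
        | some bb =>
          obtain ⟨hB, ha⟩ := hb bb rfl
          rw [show Option.map List.length (some bb) = some bb.length from rfl,
            pvLoopB_char_some hc hdot]
          have hrec := ih sc a (some (bb ++ [c])) hA (fun bb' hbb' => by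
            cases hbb'
            refine ⟨?_, ha⟩
            intro hm
            rcases List.mem_append.mp hm with hm | hm
            · exact hB hm
            · simp at hm
              exact hdot hm.symm)
          simp only [Option.map_some, List.length_append, List.length_cons,
            List.length_nil] at hrec
          rw [hrec]
          have htok : pvTok a (some (bb ++ [c])) ++ (pvSpl ',' s).1
              = pvTok a (some bb) ++ c :: (pvSpl ',' s).1 := by
            simp [pvTok]
          rw [htok]

-- ===== VERDICT (by name: the statement is the Claim_ definition above) =====
theorem FormattedNumber_spec : Claim_equal_FormattedNumber := by
  intro strArr _ hpre
  unfold Spec_FormattedNumber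
  cases strArr with
  | nil => exact absurd rfl hpre
  | cons s r =>
    have hget : PySem.List.pyGet? (s :: r) (0 : Int) = some s := by
      simp [PySem.List.pyGet?, PySem.List.pyIdx?]
    unfold FormattedNumber FormattedNumber_alt
    rw [hget]
    simp only []
    have hB := pvLoopB_main s.toList false [] none (by simp) (by simp)
    simp only [List.length_nil, Option.map_none, pvTok, List.append_nil, List.nil_append] at hB
    have hsp := pvSplitOn_eq ',' s.toList
    rw [hsp, pvLoopA_top _ _ _ rfl, hB]
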